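-- pv_equiv track=rewrite | github.com/RuiFSP/CodeWars | Python/6 kyu/alphabetized.py | alphabetized
-- ===== SOURCE A (Python) =====
-- def alphabetized(s):
--     # remove whitespace and punctuation
--     s = ''.join(filter(str.isalpha, s))
--
--     # create a histogram of the characters in the input string
--     hist = {}
--     for char in s:
--         char_lower = char.lower()
--         hist[char_lower] = hist.get(char_lower, '') + char
--
--     # iterate through the alphabet to create the output string
--     new_string = ''
--     for char in 'abcdefghijklmnopqrstuvwxyz':
--         if char in hist:
--             new_string += hist[char]
--
--     return new_string
-- ===== SOURCE B (Python) =====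
-- def alphabetized(s):
--     # Stable comparison sort by lowercase key instead of a histogram pass;
--     # restrict to ASCII letters (the only chars A's a-z histogram keeps).
--     return ''.join(sorted((c for c in s if 'a' <= c.lower() <= 'z'), key=str.lower))
-- ===== Notes on version B (the rewrite author's own statement) =====
-- stated objective: idiomatic
-- what changed: Replaced A's filter + dict histogram keyed by lowercase char + 26-letter alphabet scan (with quadratic string concatenation) with a single stable comparison sort of the kept characters by lowercase key, joined once; sort stability reproduces the bucket append order.
import Mathlib
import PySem

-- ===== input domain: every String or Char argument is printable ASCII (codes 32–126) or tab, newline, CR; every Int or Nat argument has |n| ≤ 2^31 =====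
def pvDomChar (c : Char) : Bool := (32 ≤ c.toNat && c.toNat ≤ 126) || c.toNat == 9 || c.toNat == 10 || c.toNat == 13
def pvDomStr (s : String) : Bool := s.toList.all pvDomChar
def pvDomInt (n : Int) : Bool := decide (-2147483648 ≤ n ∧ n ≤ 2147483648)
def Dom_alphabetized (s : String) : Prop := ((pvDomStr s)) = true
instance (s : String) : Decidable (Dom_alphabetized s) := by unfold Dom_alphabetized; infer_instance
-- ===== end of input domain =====

-- B replaces A's histogram-then-alphabet-scan with one stable comparison sort by lowercase key (idiomatic).

-- ===== PORT A =====
-- A: filter alphabetic chars, group them into a dict keyed by lowercase char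
-- (values concatenated in input order), then walk 'a'..'z' concatenating buckets.
def alphabetized (s : String) : String :=
  let s1 : List Char := s.toList.filter PySem.Chars.isalpha
  let hist : PySem.Dict Char (List Char) :=
    s1.foldl (fun d c =>
      d.insert (PySem.Chars.lowerChar c) (d.getD (PySem.Chars.lowerChar c) [] ++ [c]))
      PySem.Dict.empty
  let newString : List Char :=
    "abcdefghijklmnopqrstuvwxyz".toList.foldl
      (fun acc ch => if hist.contains ch then acc ++ hist.getD ch [] else acc) []
  String.ofList newString

-- ===== PORT B =====
-- B: keep chars with 'a' <= c.lower() <= 'z', stable-sort them by lowercase key, join.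
def alphabetized_alt (s : String) : String :=
  String.ofList (PySem.List.sorted
    (s.toList.filter (fun c =>
      decide ('a' ≤ PySem.Chars.lowerChar c) && decide (PySem.Chars.lowerChar c ≤ 'z')))
    PySem.Chars.lowerChar)

-- ===== PRECONDITION & SPEC =====
def Spec_alphabetized (s : String) (out : String) : Prop := out = alphabetized_alt s
instance (s : String) (out : String) : Decidable (Spec_alphabetized s out) := by unfold Spec_alphabetized; infer_instance

-- ===== CLAIM (what is proved, stated in full; the proofs are below) =====
def Claim_equal_alphabetized : Prop := ∀ (s : String), Dom_alphabetized s → Spec_alphabetized s (alphabetized s)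

-- ===== LEMMAS AND PROOFS =====

theorem char_le_iff (a b : Char) : a ≤ b ↔ a.toNat ≤ b.toNat := by
  rw [Char.le_def, UInt32.le_iff_toNat_le]
  exact Iff.rfl

-- On every Char, A's str.isalpha test agrees with B's 'a' <= c.lower() <= 'z' test
-- (PySem's isalpha/lowerChar are the ASCII definitions).
theorem isalpha_eq_lower_range (c : Char) :
    PySem.Chars.isalpha c
      = (decide ('a' ≤ PySem.Chars.lowerChar c) && decide (PySem.Chars.lowerChar c ≤ 'z')) := by
  by_cases hu : PySem.Chars.isupper c = true
  · have h1 : 65 ≤ c.toNat ∧ c.toNat ≤ 90 := by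
      simpa [PySem.Chars.isupper, char_le_iff, show 'A'.toNat = 65 from rfl,
        show 'Z'.toNat = 90 from rfl] using hu
    have hofnat : (Char.ofNat (c.toNat + 32)).toNat = c.toNat + 32 := by
      rw [Char.toNat_ofNat, if_pos]
      unfold Nat.isValidChar
      omega
    simp only [PySem.Chars.isalpha, hu, Bool.true_or, PySem.Chars.lowerChar, if_true]
    symm
    simp only [Bool.and_eq_true, decide_eq_true_eq, char_le_iff, hofnat,
      show 'a'.toNat = 97 from rfl, show 'z'.toNat = 122 from rfl]
    omega
  · simp [PySem.Chars.isalpha, PySem.Chars.islower, PySem.Chars.lowerChar, hu]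

theorem mem_alphabet_of_range (c : Char) (h1 : 97 ≤ c.toNat) (h2 : c.toNat ≤ 122) :
    c ∈ "abcdefghijklmnopqrstuvwxyz".toList := by
  rw [← Char.ofNat_toNat c]
  interval_cases h : c.toNat <;> decide

theorem insertBy_append_not_before (bf : Char → Char → Bool) (x : Char) (l1 l2 : List Char)
    (h : ∀ y ∈ l1, bf x y = false) :
    PySem.List.insertBy bf x (l1 ++ l2) = l1 ++ PySem.List.insertBy bf x l2 := by
  induction l1 with
  | nil => simp
  | cons y ys ih =>
    simp only [List.cons_append, PySem.List.insertBy, h y (by simp)]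
    simp only [Bool.false_eq_true, if_false, List.cons.injEq, true_and]
    exact ih (fun z hz => h z (by simp [hz]))

theorem insertBy_all_before (bf : Char → Char → Bool) (x : Char) (l : List Char)
    (h : ∀ y ∈ l, bf x y = true) :
    PySem.List.insertBy bf x l = x :: l := by
  cases l with
  | nil => rfl
  | cons y ys => simp [PySem.List.insertBy, h y (by simp)]

-- A stable sort by key equals the concatenation, over the strictly increasing key
-- list alph, of the input's key-buckets in input order.
theorem sorted_eq_buckets (alph : List Char) (key : Char → Char) (xs : List Char)
    (hA : alph.Pairwise (· < ·)) (hx : ∀ c ∈ xs, key c ∈ alph) :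
    PySem.List.sorted xs key
      = alph.flatMap (fun ch => xs.filter (fun c => key c == ch)) := by
  induction xs using List.reverseRecOn with
  | nil => simp [PySem.List.sorted_eq_foldl_insertBy]
  | append_singleton xs x ih =>
    rw [PySem.List.sorted_eq_foldl_insertBy, List.foldl_append,
      ← PySem.List.sorted_eq_foldl_insertBy,
      ih (fun c hc => hx c (by simp [hc]))]
    obtain ⟨A1, A2, hsplit⟩ := List.append_of_mem (hx x (by simp))
    subst hsplit
    rw [List.pairwise_append] at hA
    obtain ⟨hA1, hA2c, hcross⟩ := hA
    rw [List.pairwise_cons] at hA2c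
    have hlt1 : ∀ ch ∈ A1, ch < key x := fun ch hch => hcross ch hch (key x) (by simp)
    have hlt2 : ∀ ch ∈ A2, key x < ch := hA2c.1
    simp only [List.foldl_cons, List.flatMap_append, List.flatMap_cons]
    rw [← List.append_assoc,
      insertBy_append_not_before _ _ _ _ (by
        intro y hy
        rcases List.mem_append.mp hy with hy | hy
        · obtain ⟨ch, hch, hy⟩ := List.mem_flatMap.mp hy
          have hkey : key y = ch := by simpa using (List.mem_filter.mp hy).2
          have hlt := hlt1 ch hch
          simp only [decide_eq_false_iff_not]
          intro hcon; rw [hkey] at hcon; exact lt_asymm hlt hcon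
        · have : key y = key x := by simpa using (List.mem_filter.mp hy).2
          simp [this]),
      insertBy_all_before _ _ _ (by
        intro y hy
        obtain ⟨ch, hch, hy⟩ := List.mem_flatMap.mp hy
        have : key y = ch := by simpa using (List.mem_filter.mp hy).2
        simp [this, hlt2 ch hch])]
    have hbkt : ∀ ch : Char, (xs ++ [x]).filter (fun c => key c == ch)
        = xs.filter (fun c => key c == ch) ++ (if key x == ch then [x] else []) := by
      intro ch
      rw [List.filter_append]
      congr 1
      by_cases h : key x == ch <;> simp [List.filter, h]
    have hdrop : ∀ ch : Char, ch ≠ key x →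
        (xs ++ [x]).filter (fun c => key c == ch) = xs.filter (fun c => key c == ch) := by
      intro ch hne
      rw [hbkt ch, if_neg (by simpa using hne.symm), List.append_nil]
    rw [List.flatMap_congr (l := A1) (g := fun ch => xs.filter (fun c => key c == ch))
        (fun ch hch => hdrop ch (ne_of_lt (hlt1 ch hch))),
      List.flatMap_congr (l := A2) (g := fun ch => xs.filter (fun c => key c == ch))
        (fun ch hch => hdrop ch (ne_of_gt (hlt2 ch hch))),
      hbkt (key x), if_pos (by simp)]
    simp

theorem foldl_contains_getD (d : PySem.Dict Char (List Char)) (l : List Char) (acc : List Char) :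
    l.foldl (fun acc ch => if d.contains ch then acc ++ d.getD ch [] else acc) acc
      = acc ++ l.flatMap (fun ch => d.getD ch []) := by
  induction l generalizing acc with
  | nil => simp
  | cons ch t ih =>
    simp only [List.foldl_cons, List.flatMap_cons]
    by_cases h : d.contains ch = true
    · rw [if_pos h, ih, List.append_assoc]
    · rw [if_neg (by simp [h]), ih,
        PySem.Dict.getD_of_not_contains d _ (by simpa using h)]
      simp

theorem alphabetized_eq_buckets (s : String) :
    alphabetized s = String.ofList
      ("abcdefghijklmnopqrstuvwxyz".toList.flatMap
        (fun ch => (s.toList.filter PySem.Chars.isalpha).filter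
          (fun c => PySem.Chars.lowerChar c == ch))) := by
  unfold alphabetized
  have hhist : ∀ ch : Char,
      ((s.toList.filter PySem.Chars.isalpha).foldl (fun d c =>
        d.insert (PySem.Chars.lowerChar c) (d.getD (PySem.Chars.lowerChar c) [] ++ [c]))
        PySem.Dict.empty).getD ch []
      = (s.toList.filter PySem.Chars.isalpha).filter (fun c => PySem.Chars.lowerChar c == ch) := by
    intro ch
    have hrw : (s.toList.filter PySem.Chars.isalpha).foldl (fun d c =>
        d.insert (PySem.Chars.lowerChar c) (d.getD (PySem.Chars.lowerChar c) [] ++ [c]))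
        (PySem.Dict.empty : PySem.Dict Char (List Char))
        = ((s.toList.filter PySem.Chars.isalpha).map (fun c => (PySem.Chars.lowerChar c, c))).foldl
            (fun d p => d.modify p.1 [] (· ++ [p.2])) PySem.Dict.empty := by
      rw [List.foldl_map]; rfl
    rw [hrw, PySem.Dict.getD_foldl_modify_append]
    simp [List.filter_map, Function.comp_def]
  simp only [foldl_contains_getD, List.nil_append]
  congr 1
  exact List.flatMap_congr (fun ch _ => hhist ch)

-- ===== VERDICT (by name: the statement is the Claim_ definition above) =====
theorem alphabetized_spec : Claim_equal_alphabetized := by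
  intro s _
  show alphabetized s = alphabetized_alt s
  rw [alphabetized_eq_buckets]
  unfold alphabetized_alt
  rw [List.filter_congr (fun c _ => (isalpha_eq_lower_range c).symm)]
  have hmem : ∀ c ∈ s.toList.filter PySem.Chars.isalpha,
      PySem.Chars.lowerChar c ∈ "abcdefghijklmnopqrstuvwxyz".toList := by
    intro c hc
    have h := (List.mem_filter.mp hc).2
    rw [isalpha_eq_lower_range] at h
    simp only [Bool.and_eq_true, decide_eq_true_eq] at h
    refine mem_alphabet_of_range _ ?_ ?_
    · have := (char_le_iff _ _).mp h.1
      simpa [show 'a'.toNat = 97 from rfl] using this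
    · have := (char_le_iff _ _).mp h.2
      simpa [show 'z'.toNat = 122 from rfl] using this
  rw [sorted_eq_buckets "abcdefghijklmnopqrstuvwxyz".toList PySem.Chars.lowerChar
    (s.toList.filter PySem.Chars.isalpha) (by decide) hmem]
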